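-- pv_equiv track=rewrite | github.com/zeinabelsayed98/Crypto-cipher-Tool | final crypto.py | get_key_order
-- ===== SOURCE A (Python) =====
-- def get_key_order(key):
--     key_lower = key.lower()
--     indexed_key_chars = []
--     for i, char_val in enumerate(key_lower):
--         indexed_key_chars.append((char_val, i))
--
--     sorted_indexed_key_chars = sorted(indexed_key_chars, key=lambda x: (x[0], x[1]))
--
--     order = [0] * len(key)
--     for rank, (char_val, original_index) in enumerate(sorted_indexed_key_chars):
--         order[original_index] = rank
--     return order
-- ===== SOURCE B (Python) =====
-- def get_key_order(key):
--     kl = key.lower()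
--     p = sorted(range(len(kl)), key=lambda i: kl[i])
--     return sorted(range(len(p)), key=lambda r: p[r])
-- ===== Notes on version B (the rewrite author's own statement) =====
-- stated objective: idiomatic
-- what changed: Replaces A's build-(char,index)-tuples / sort / scatter-ranks-into-a-preallocated-list pipeline with the standard double-argsort idiom: a stable argsort of the indices by lowered character, then a second sort of the ranks that inverts the permutation; no tuple list and no index-assignment loop.
import Mathlib
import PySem

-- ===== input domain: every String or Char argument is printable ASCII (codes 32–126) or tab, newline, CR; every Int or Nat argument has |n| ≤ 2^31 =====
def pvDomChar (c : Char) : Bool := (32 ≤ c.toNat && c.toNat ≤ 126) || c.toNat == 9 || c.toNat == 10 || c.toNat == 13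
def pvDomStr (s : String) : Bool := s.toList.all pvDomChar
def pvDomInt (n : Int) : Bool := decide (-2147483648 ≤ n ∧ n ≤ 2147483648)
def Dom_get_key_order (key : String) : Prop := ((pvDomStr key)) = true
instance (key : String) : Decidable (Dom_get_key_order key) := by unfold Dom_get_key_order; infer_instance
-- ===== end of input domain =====

-- B replaces A's tuple-build / sort / scatter-ranks loop with the idiomatic double argsort
-- (stable argsort of indices, then a second sort that inverts the permutation); same asymptotic cost, measured constant-factor faster.

-- ===== PORT A =====
def get_key_order (key : String) : List Int :=
  let key_lower := PySem.Str.lower key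
  let indexed_key_chars :=
    (PySem.List.enumerate key_lower.toList).foldl
      (fun acc ic => acc ++ [(ic.2, ic.1)]) []
  let sorted_indexed_key_chars :=
    PySem.List.sorted2 indexed_key_chars (fun x => x.1) (fun x => x.2)
  let order : List Int := PySem.List.pyRepeat [(0 : Int)] (PySem.Str.len key)
  (PySem.List.enumerate sorted_indexed_key_chars).foldl
    (fun ord rp => PySem.List.pySetD ord rp.2.2 rp.1) order

-- ===== PORT B =====
def get_key_order_alt (key : String) : List Int :=
  let kl := (PySem.Str.lower key).toList
  let p := PySem.List.sorted (PySem.List.pyRange 0 (kl.length : Int))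
             (fun i => PySem.List.pyGetD kl i ' ')
  PySem.List.sorted (PySem.List.pyRange 0 (p.length : Int))
    (fun r => PySem.List.pyGetD p r 0)

-- ===== PRECONDITION & SPEC =====
def Spec_get_key_order (key : String) (out : List Int) : Prop := out = get_key_order_alt key
instance (key : String) (out : List Int) : Decidable (Spec_get_key_order key out) := by unfold Spec_get_key_order; infer_instance

-- ===== CLAIM (what is proved, stated in full; the proofs are below) =====
def Claim_equal_get_key_order : Prop := ∀ (key : String), Dom_get_key_order key → Spec_get_key_order key (get_key_order key)

-- ===== LEMMAS AND PROOFS =====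

-- insertBy only looks at `before x ·` applied to members of the list.
theorem pv_insertBy_congr {α : Type} (b1 b2 : α → α → Bool) (x : α) (ys : List α)
    (h : ∀ y ∈ ys, b1 x y = b2 x y) :
    PySem.List.insertBy b1 x ys = PySem.List.insertBy b2 x ys := by
  induction ys with
  | nil => rfl
  | cons y t ih =>
    simp only [PySem.List.insertBy]
    rw [h y (by simp)]
    split
    · rfl
    · rw [ih (fun z hz => h z (by simp [hz]))]

-- an insertion-sort fold is unchanged if the two `before` tests agree on every
-- (inserted element, earlier element) pair it ever evaluates
theorem pv_foldl_insertBy_congr {α : Type} (b1 b2 : α → α → Bool) :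
    ∀ (l acc : List α),
    (∀ x ∈ l, ∀ y ∈ acc, b1 x y = b2 x y) →
    l.Pairwise (fun y x => b1 x y = b2 x y) →
    l.foldl (fun a x => PySem.List.insertBy b1 x a) acc
      = l.foldl (fun a x => PySem.List.insertBy b2 x a) acc := by
  intro l
  induction l with
  | nil => intro acc _ _; rfl
  | cons x t ih =>
    intro acc hacc hpw
    have hx : PySem.List.insertBy b1 x acc = PySem.List.insertBy b2 x acc :=
      pv_insertBy_congr b1 b2 x acc (fun y hy => hacc x (by simp) y hy)
    simp only [List.foldl_cons, hx]
    refine ih (PySem.List.insertBy b2 x acc) ?_ hpw.tail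
    intro z hz y hy
    rcases (PySem.List.mem_insertBy b2 x y acc).1 hy with rfl | hy'
    · exact (List.pairwise_cons.1 hpw).1 z hz
    · exact hacc z (by simp [hz]) y hy'

-- sorting with the tuple key (k1, k2) is sorting with the lexicographic key
theorem pv_sorted2_eq_lex {α κ₁ κ₂ : Type} [LinearOrder κ₁] [LinearOrder κ₂]
    (xs : List α) (k1 : α → κ₁) (k2 : α → κ₂) :
    PySem.List.sorted2 xs k1 k2
      = PySem.List.sorted xs (fun x => toLex (k1 x, k2 x)) := by
  simp only [PySem.List.sorted2, PySem.List.sorted]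
  congr 1
  funext acc x
  congr 1
  funext a b
  simp only [Prod.Lex.toLex_lt_toLex]
  rcases lt_trichotomy (k1 a) (k1 b) with h | h | h
  · simp [h, not_lt_of_gt h]
  · simp [h]
  · have h1 : ¬ k1 a < k1 b := not_lt_of_gt h
    have h2 : k1 a ≠ k1 b := ne_of_gt h
    simp [h, h1, h2]

theorem pv_insertBy_map {α β : Type} (before : β → β → Bool) (f : α → β) (x : α) :
    ∀ (ys : List α),
    PySem.List.insertBy before (f x) (ys.map f)
      = (PySem.List.insertBy (fun a b => before (f a) (f b)) x ys).map f := by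
  intro ys
  induction ys with
  | nil => rfl
  | cons y t ih =>
    simp only [List.map_cons, PySem.List.insertBy]
    split
    · simp
    · simp [ih]

-- sorting a mapped list by `key` is mapping the sort by `key ∘ f`
theorem pv_sorted_map {α β κ : Type} [LT κ] [DecidableLT κ]
    (f : α → β) (key : β → κ) (l : List α) :
    PySem.List.sorted (l.map f) key
      = (PySem.List.sorted l (fun x => key (f x))).map f := by
  simp only [PySem.List.sorted, if_neg (by simp : ¬ (false = true)), List.foldl_map]
  suffices h : ∀ (l : List α) (acc : List α),
      l.foldl (fun a x => PySem.List.insertBy (fun a b => decide (key a < key b)) (f x) a) (acc.map f)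
        = (l.foldl (fun a x => PySem.List.insertBy (fun a b => decide (key (f a) < key (f b))) x a) acc).map f by
    simpa using h l []
  intro l
  induction l with
  | nil => intro acc; rfl
  | cons x t ih =>
    intro acc
    simp only [List.foldl_cons, pv_insertBy_map, ih]

-- STABILITY: on a strictly increasing list of indices, the stable sort by `c`
-- equals the sort by the lexicographic key (c i, i)
theorem pv_sorted_stable_lex {κ : Type} [LinearOrder κ]
    (l : List Int) (hl : l.Pairwise (· < ·)) (c : Int → κ) :
    PySem.List.sorted l c
      = PySem.List.sorted l (fun i => toLex (c i, i)) := by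
  simp only [PySem.List.sorted, if_neg (by simp : ¬ (false = true))]
  apply pv_foldl_insertBy_congr
  · intro x _ y hy; simp at hy
  · refine hl.imp ?_
    intro y x hyx
    simp only [Prod.Lex.toLex_lt_toLex, decide_eq_decide]
    constructor
    · intro h; exact Or.inl h
    · rintro (h | ⟨_, hxy⟩)
      · exact h
      · exact absurd hyx (not_lt_of_gt hxy)

theorem pv_enumerate_map {α β : Type} (f : α → β) :
    ∀ (l : List α) (s : Int),
    PySem.List.enumerate (l.map f) s
      = (PySem.List.enumerate l s).map (fun ri => (ri.1, f ri.2)) := by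
  intro l
  induction l with
  | nil => intro s; rfl
  | cons x t ih => intro s; simp [PySem.List.enumerate, ih]

theorem pv_enum_swap_map {α : Type} (d : α) :
    ∀ (cs : List α) (s : Int),
    (PySem.List.enumerate cs s).map (fun ic => (ic.2, ic.1))
      = (List.range cs.length).map (fun k => (cs.getD k d, s + (k : Int))) := by
  intro cs
  induction cs with
  | nil => intro s; rfl
  | cons c t ih =>
    intro s
    simp only [PySem.List.enumerate, List.map_cons, List.length_cons,
      List.range_succ_eq_map, ih (s + 1), List.map_map]
    refine congrArg₂ _ (by simp) ?_
    apply List.map_congr_left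
    intro k _
    simp only [Function.comp, Nat.succ_eq_add_one, Prod.mk.injEq]
    exact ⟨rfl, by push_cast; ring⟩

-- positions not written by the fold keep their value
theorem pv_scatter_untouched (j : Nat) :
    ∀ (l : List (Int × Int)) (ord : List Int),
    (∀ rp ∈ l, 0 ≤ rp.2) → (∀ rp ∈ l, rp.2.toNat ≠ j) →
    (l.foldl (fun o rp => PySem.List.pySetD o rp.2 rp.1) ord).getD j 0 = ord.getD j 0 := by
  intro l
  induction l with
  | nil => intro ord _ _; rfl
  | cons rp t ih =>
    intro ord hnn hne
    simp only [List.foldl_cons]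
    rw [ih _ (fun q hq => hnn q (by simp [hq])) (fun q hq => hne q (by simp [hq]))]
    rw [PySem.List.pySetD_of_nonneg _ _ (hnn rp (by simp))]
    rw [List.getD_eq_getElem?_getD, List.getD_eq_getElem?_getD,
        List.getElem?_set_ne (hne rp (by simp))]

theorem pv_scatter_length :
    ∀ (l : List (Int × Int)) (ord : List Int),
    (l.foldl (fun o rp => PySem.List.pySetD o rp.2 rp.1) ord).length = ord.length := by
  intro l
  induction l with
  | nil => intro ord; rfl
  | cons rp t ih => intro ord; simp [ih, PySem.List.length_pySetD]

-- value at a position written exactly once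
theorem pv_scatter_get (j : Nat) :
    ∀ (l : List (Int × Int)) (ord : List Int),
    (∀ rp ∈ l, 0 ≤ rp.2) → l.Pairwise (fun a b => a.2 ≠ b.2) →
    ∀ rp ∈ l, rp.2.toNat = j → j < ord.length →
    (l.foldl (fun o rp => PySem.List.pySetD o rp.2 rp.1) ord).getD j 0 = rp.1 := by
  intro l
  induction l with
  | nil => intro ord _ _ rp h; simp at h
  | cons q t ih =>
    intro ord hnn hpw rp hrp hj hlen
    simp only [List.foldl_cons]
    rcases List.mem_cons.1 hrp with rfl | hrp'
    · rw [pv_scatter_untouched j t _ (fun z hz => hnn z (by simp [hz])) ?_]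
      · rw [PySem.List.pySetD_of_nonneg _ _ (hnn rp (by simp))]
        rw [List.getD_eq_getElem?_getD, hj, List.getElem?_set_self (by simpa [hj] using hlen)]
        simp
      · intro z hz
        have hne := (List.pairwise_cons.1 hpw).1 z hz
        have h0 := hnn rp (by simp)
        have h1 := hnn z (by simp [hz])
        intro hc; apply hne; omega
    · exact ih _ (fun z hz => hnn z (by simp [hz])) hpw.tail rp hrp' hj
        (by rw [PySem.List.length_pySetD]; exact hlen)

-- first enumerate entry whose value is j sits at index idxOf j q
theorem pv_enum_mem_idxOf (j : Int) :
    ∀ (q : List Int) (s : Int), j ∈ q →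
    (s + (List.idxOf j q : Int), j) ∈ PySem.List.enumerate q s := by
  intro q
  induction q with
  | nil => intro s h; simp at h
  | cons x t ih =>
    intro s hj
    by_cases hx : j = x
    · subst hx; simp [PySem.List.enumerate, List.idxOf_cons_self]
    · have hjt : j ∈ t := by rcases List.mem_cons.1 hj with h | h; exact absurd h hx; exact h
      have := ih (s + 1) hjt
      simp only [PySem.List.enumerate, List.mem_cons]
      right
      rw [List.idxOf_cons_ne _ (by exact fun h => hx h.symm)]
      convert this using 2
      push_cast; ring

theorem pv_enumerate_mem_snd {α : Type} :
    ∀ (q : List α) (s : Int), ∀ rp ∈ PySem.List.enumerate q s, rp.2 ∈ q := by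
  intro q
  induction q with
  | nil => intro s rp h; simp [PySem.List.enumerate] at h
  | cons x t ih =>
    intro s rp hrp
    simp only [PySem.List.enumerate, List.mem_cons] at hrp ⊢
    rcases hrp with rfl | h
    · exact Or.inl rfl
    · exact Or.inr (ih (s + 1) rp h)

theorem pv_enumerate_pairwise_snd {α : Type} :
    ∀ (q : List α) (s : Int), q.Nodup →
    (PySem.List.enumerate q s).Pairwise (fun a b => a.2 ≠ b.2) := by
  intro q
  induction q with
  | nil => intro s _; simp [PySem.List.enumerate]
  | cons x t ih =>
    intro s hnd
    simp only [PySem.List.enumerate, List.pairwise_cons]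
    refine ⟨fun rp hrp => ?_, ih (s + 1) hnd.of_cons⟩
    have := pv_enumerate_mem_snd t (s + 1) rp hrp
    exact fun hc => (List.nodup_cons.1 hnd).1 (hc ▸ this)

-- the heart of the equivalence, stated over the lowered character list
theorem pv_core (cs : List Char) :
    (PySem.List.enumerate
        (PySem.List.sorted2
          ((PySem.List.enumerate cs).foldl (fun acc ic => acc ++ [(ic.2, ic.1)]) [])
          (fun x => x.1) (fun x => x.2))).foldl
      (fun ord rp => PySem.List.pySetD ord rp.2.2 rp.1)
      (PySem.List.pyRepeat [(0 : Int)] (cs.length : Int))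
    = PySem.List.sorted
        (PySem.List.pyRange 0
          (((PySem.List.sorted (PySem.List.pyRange 0 (cs.length : Int))
              (fun i => PySem.List.pyGetD cs i ' ')).length : Int)))
        (fun r => PySem.List.pyGetD
            (PySem.List.sorted (PySem.List.pyRange 0 (cs.length : Int))
              (fun i => PySem.List.pyGetD cs i ' ')) r 0) := by
  set n := cs.length with hn
  set c : Int → Char := fun i => PySem.List.pyGetD cs i ' ' with hc
  set f : Int → Char × Int := fun i => (c i, i) with hf
  set R : List Int := PySem.List.pyRange 0 (n : Int) with hR
  set p : List Int := PySem.List.sorted R c with hp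
  have hRmap : R = (List.range n).map (fun k : Nat => (k : Int)) :=
    PySem.List.pyRange_zero_natCast n
  have hRlen : R.length = n := by rw [hRmap]; simp
  have hRnodup : R.Nodup := by
    rw [hRmap]
    exact (List.nodup_range).map_on (by intro a _ b _ h; exact_mod_cast h)
  have hRpw : R.Pairwise (· < ·) := by
    rw [hRmap, List.pairwise_map]
    exact List.pairwise_lt_range.imp (by intro a b h; exact_mod_cast h)
  have hpperm : p.Perm R := PySem.List.sorted_perm R c false
  have hplen : p.length = n := by rw [hpperm.length_eq, hRlen]
  have hpnodup : p.Nodup := hpperm.nodup_iff.2 hRnodup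
  have hpmem : ∀ j : Nat, j < n → ((j : Int) ∈ p) := by
    intro j hj
    rw [hpperm.mem_iff, hR, PySem.List.mem_pyRange_one]
    omega
  -- step 1: the tuple-building loop produces R.map f
  have hidx : (PySem.List.enumerate cs).foldl (fun acc ic => acc ++ [(ic.2, ic.1)]) []
      = R.map f := by
    simp only [PySem.List.foldl_append_singleton_eq_map (fun (ic : Int × Char) => (ic.2, ic.1)),
      List.nil_append]
    rw [pv_enum_swap_map ' ' cs 0, hRmap, List.map_map]
    apply List.map_congr_left
    intro k hk
    simp only [Function.comp, hf, hc, PySem.List.pyGetD_natCast]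
    simp
  -- steps 2-3: the pair sort is the mapped stable index sort
  have hsortA : PySem.List.sorted2 (R.map f) (fun x => x.1) (fun x => x.2) = p.map f := by
    rw [pv_sorted2_eq_lex (R.map f) (fun x => x.1) (fun x => x.2)]
    rw [pv_sorted_map f (fun x => toLex (x.1, x.2)) R]
    rw [hp, pv_sorted_stable_lex R hRpw c]
  -- step 4: the scatter loop over the mapped pairs
  rw [hidx, hsortA]
  rw [PySem.List.pyRepeat_singleton, Int.toNat_natCast]
  rw [pv_enumerate_map f p 0, List.foldl_map]
  -- the fold body now only uses the index component
  have hbody : (fun (ord : List Int) (ri : Int × Int) =>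
        PySem.List.pySetD ord ((ri.1, f ri.2)).2.2 ((ri.1, f ri.2)).1)
      = fun ord ri => PySem.List.pySetD ord ri.2 ri.1 := rfl
  rw [hbody]
  -- step 5: the scatter result, elementwise
  set W : List Int := (List.range n).map (fun j => ((List.idxOf ((j : Nat) : Int) p : Nat) : Int))
    with hW
  have henum_nn : ∀ rp ∈ PySem.List.enumerate p 0, 0 ≤ rp.2 := by
    intro rp hrp
    have := pv_enumerate_mem_snd p 0 rp hrp
    have := hpperm.mem_iff.1 this
    rw [hR, PySem.List.mem_pyRange_one] at this
    omega
  have henum_pw : (PySem.List.enumerate p 0).Pairwise (fun a b => a.2 ≠ b.2) :=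
    pv_enumerate_pairwise_snd p 0 hpnodup
  have hscat : (PySem.List.enumerate p 0).foldl
      (fun ord rp => PySem.List.pySetD ord rp.2 rp.1) (List.replicate n 0) = W := by
    apply List.ext_getElem
    · rw [pv_scatter_length, List.length_replicate, hW, List.length_map, List.length_range]
    · intro j hjf hj2
      have hj : j < n := by
        have h := hjf; rwa [pv_scatter_length, List.length_replicate] at h
      have hjp : ((j : Int)) ∈ p := hpmem j hj
      have hidxlt : List.idxOf ((j : Int)) p < p.length := List.idxOf_lt_length_of_mem hjp
      have hW_get : W[j] = ((List.idxOf ((j : Int)) p : Nat) : Int) := by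
        simp [hW]
      have hsc := pv_scatter_get j (PySem.List.enumerate p 0) (List.replicate n 0) henum_nn henum_pw
        (((0 : Int) + (List.idxOf ((j : Int)) p : Int), (j : Int)))
        (by simpa using pv_enum_mem_idxOf (j : Int) p 0 hjp)
        (by simp) (by simp [hj])
      rw [List.getD_eq_getElem _ 0 hjf] at hsc
      rw [hW_get]
      simpa using hsc
  rw [hscat]
  -- step 6: W is exactly the second argsort
  set keyp : Int → Int := fun r => PySem.List.pyGetD p r 0 with hkeyp
  have hkeyW : ∀ j : Nat, j < n → keyp ((List.idxOf ((j : Int)) p : Nat) : Int) = (j : Int) := by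
    intro j hj
    have hjp : ((j : Int)) ∈ p := hpmem j hj
    have hidxlt : List.idxOf ((j : Int)) p < p.length := List.idxOf_lt_length_of_mem hjp
    rw [hkeyp]
    simp only [PySem.List.pyGetD_natCast]
    rw [List.getD_eq_getElem _ 0 hidxlt, List.getElem_idxOf]
  have hWpw : W.Pairwise (fun a b => keyp a < keyp b) := by
    rw [hW, List.pairwise_map]
    refine List.pairwise_lt_range.imp_of_mem ?_
    intro a b ha hb hab
    rw [hkeyW a (List.mem_range.1 ha), hkeyW b (List.mem_range.1 hb)]
    exact_mod_cast hab
  have hWperm : W.Perm R := by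
    have hWnodup : W.Nodup := by
      rw [hW]
      refine List.nodup_range.map_on ?_
      intro a ha b hb hfab
      have := congrArg keyp hfab
      rw [hkeyW a (List.mem_range.1 ha), hkeyW b (List.mem_range.1 hb)] at this
      exact_mod_cast this
    have hWsub : W ⊆ R := by
      intro x hx
      rw [hW] at hx
      rcases List.mem_map.1 hx with ⟨j, hj, rfl⟩
      have hjp : ((j : Int)) ∈ p := hpmem j (List.mem_range.1 hj)
      have hidxlt : List.idxOf ((j : Int)) p < p.length := List.idxOf_lt_length_of_mem hjp
      rw [hR, PySem.List.mem_pyRange_one]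
      constructor
      · positivity
      · rw [hplen] at hidxlt; exact_mod_cast hidxlt
    have hlen : R.length ≤ W.length := by
      rw [hRlen, hW, List.length_map, List.length_range]
    exact (List.subperm_of_subset hWnodup hWsub).perm_of_length_le hlen
  -- step 7: conclude via the sorted characterization
  rw [hplen]
  exact (PySem.List.sorted_eq_of_perm_of_pairwise_lt R W keyp hWperm hWpw).symm

theorem pv_main (key : String) : get_key_order key = get_key_order_alt key := by
  unfold get_key_order get_key_order_alt
  have hlen : PySem.Str.len key = (((PySem.Str.lower key).toList).length : Int) := by
    rw [PySem.Str.len, PySem.Str.toList_lower]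
    simp [PySem.Chars.lower]
  rw [hlen]
  exact pv_core (PySem.Str.lower key).toList

-- ===== VERDICT (by name: the statement is the Claim_ definition above) =====
theorem get_key_order_spec : Claim_equal_get_key_order := by
  intro key _
  unfold Spec_get_key_order
  exact pv_main key
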